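-- pv_equiv track=rewrite | github.com/craigaq/wine-wizard | backend/local_sourcing.py | get_region_tier
-- ===== SOURCE A (Python) =====
-- def get_region_tier(region: str) -> int:
--     """Return the geographic tier (1–3) for a wine's production region."""
--     r = region.lower()
--     if any(k in r for k in (
--         "adelaide hills", "mclaren vale", "barossa", "clare valley",
--         "eden valley", "coonawarra", "langhorne creek", "riverland",
--         "padthaway", "wrattonbully", "south australia", ", sa",
--     )):
--         return 1
--     if any(k in r for k in (
--         "yarra valley", "mornington", "gippsland", "king valley",
--         "grampians", "heathcote", "victoria", ", vic",
--         "margaret river", "great southern", "swan valley",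
--         "western australia", ", wa",
--         "hunter valley", "mudgee", "riverina", "orange",
--         "new south wales", ", nsw",
--         "canberra", "tasmania", ", tas",
--         ", aus",
--     )):
--         return 2
--     return 3
-- ===== SOURCE B (Python) =====
-- # B: position-driven scan (naive multi-pattern matcher): walk every start index of the
-- # lowercased text and min-accumulate the tier of each keyword that begins there.
-- _TABLE = [
--     ("adelaide hills", 1), ("mclaren vale", 1), ("barossa", 1), ("clare valley", 1),
--     ("eden valley", 1), ("coonawarra", 1), ("langhorne creek", 1), ("riverland", 1),
--     ("padthaway", 1), ("wrattonbully", 1), ("south australia", 1), (", sa", 1),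
--     ("yarra valley", 2), ("mornington", 2), ("gippsland", 2), ("king valley", 2),
--     ("grampians", 2), ("heathcote", 2), ("victoria", 2), (", vic", 2),
--     ("margaret river", 2), ("great southern", 2), ("swan valley", 2),
--     ("western australia", 2), (", wa", 2),
--     ("hunter valley", 2), ("mudgee", 2), ("riverina", 2), ("orange", 2),
--     ("new south wales", 2), (", nsw", 2),
--     ("canberra", 2), ("tasmania", 2), (", tas", 2),
--     (", aus", 2),
-- ]
--
-- def get_region_tier(region: str) -> int:
--     r = region.lower()
--     best = 3
--     for i in range(len(r)):
--         for kw, tier in _TABLE: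
--             if r.startswith(kw, i):
--                 best = min(best, tier)
--     return best
-- ===== Notes on version B (the rewrite author's own statement) =====
-- stated objective: alternative
-- what changed: Replaced the two ordered short-circuit any(substring-in) blocks with a position-driven text scan: walk every start index of the lowercased region and min-accumulate the tier of each keyword that begins at that index (default 3).
import Mathlib
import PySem

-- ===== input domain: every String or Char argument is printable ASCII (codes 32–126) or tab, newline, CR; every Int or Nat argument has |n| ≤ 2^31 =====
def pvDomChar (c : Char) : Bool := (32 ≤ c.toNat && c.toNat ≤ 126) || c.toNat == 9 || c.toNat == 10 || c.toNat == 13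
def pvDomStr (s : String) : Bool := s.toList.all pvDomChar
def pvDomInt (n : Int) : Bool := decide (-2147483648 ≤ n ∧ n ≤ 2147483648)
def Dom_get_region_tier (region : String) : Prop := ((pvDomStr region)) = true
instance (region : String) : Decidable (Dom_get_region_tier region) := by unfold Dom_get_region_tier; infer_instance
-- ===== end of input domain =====

-- B replaces A's keyword-driven substring membership blocks with a position-driven text scan
-- (min-accumulate the tier of each keyword that begins at each start index) (objective: alternative; no speed claim).
-- ===== PORT A =====
def pvTier1Kws : List String := ["adelaide hills", "mclaren vale", "barossa", "clare valley", "eden valley", "coonawarra", "langhorne creek", "riverland", "padthaway", "wrattonbully", "south australia", ", sa"]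

def pvTier2Kws : List String := ["yarra valley", "mornington", "gippsland", "king valley", "grampians", "heathcote", "victoria", ", vic", "margaret river", "great southern", "swan valley", "western australia", ", wa", "hunter valley", "mudgee", "riverina", "orange", "new south wales", ", nsw", "canberra", "tasmania", ", tas", ", aus"]

def get_region_tier (region : String) : Int :=
  let r := PySem.Str.lower region
  if pvTier1Kws.any (fun k => PySem.Str.isIn k r) then 1
  else if pvTier2Kws.any (fun k => PySem.Str.isIn k r) then 2
  else 3

-- ===== PORT B =====
def pvTable : List (String × Int) := [("adelaide hills", 1), ("mclaren vale", 1), ("barossa", 1), ("clare valley", 1), ("eden valley", 1), ("coonawarra", 1), ("langhorne creek", 1), ("riverland", 1), ("padthaway", 1), ("wrattonbully", 1), ("south australia", 1), (", sa", 1), ("yarra valley", 2), ("mornington", 2), ("gippsland", 2), ("king valley", 2), ("grampians", 2), ("heathcote", 2), ("victoria", 2), (", vic", 2), ("margaret river", 2), ("great southern", 2), ("swan valley", 2), ("western australia", 2), (", wa", 2), ("hunter valley", 2), ("mudgee", 2), ("riverina", 2), ("orange", 2), ("new south wales", 2), (", nsw", 2), ("canberra", 2), ("tasmania", 2), (", tas",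 2), (", aus", 2)]

-- r.startswith(kw, i) with 0 ≤ i from range(len(r)) is exactly the prefix test on r dropped at i (exact here).
def get_region_tier_alt (region : String) : Int :=
  let r := (PySem.Str.lower region).toList
  (PySem.List.pyRange 0 r.length 1).foldl
    (fun best i =>
      pvTable.foldl
        (fun b p => if PySem.Chars.startswith (r.drop i.toNat) p.1.toList then min b p.2 else b)
        best)
    3

-- ===== PRECONDITION & SPEC =====
def Spec_get_region_tier (region : String) (out : Int) : Prop := out = get_region_tier_alt region
instance (region : String) (out : Int) : Decidable (Spec_get_region_tier region out) := by unfold Spec_get_region_tier; infer_instance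

-- ===== CLAIM (what is proved, stated in full; the proofs are below) =====
def Claim_equal_get_region_tier : Prop := ∀ (region : String), Dom_get_region_tier region → Spec_get_region_tier region (get_region_tier region)

-- ===== LEMMAS AND PROOFS =====
-- the flat table is the two keyword lists tagged with their tiers
theorem pvTable_eq :
    pvTable = pvTier1Kws.map (fun k => (k, (1 : Int))) ++ pvTier2Kws.map (fun k => (k, (2 : Int))) := by
  decide

-- folding the min-step over keywords all tagged with one tier is an 'any' test
theorem pvFoldl_const_tier (c : String → Bool) (kws : List String) (t a : Int) :
    (kws.map (fun k => (k, t))).foldl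
        (fun b p => if c p.1 then min b p.2 else b) a
      = if kws.any c then min a t else a := by
  induction kws generalizing a with
  | nil => simp
  | cons k ks ih =>
    simp only [List.map_cons, List.foldl_cons, List.any_cons]
    by_cases h : c k = true
    · rw [if_pos h]
      simp only [h, Bool.true_or]
      rw [if_pos trivial, ih]
      split <;> omega
    · rw [if_neg h]
      rw [Bool.not_eq_true] at h
      simp only [h, Bool.false_or]
      exact ih a

-- B's inner fold at one position, as an if-expression on the two 'any keyword starts here' tests
theorem pvInner_eq (r : List Char) (i : Int) (b : Int) :
    pvTable.foldl
        (fun b p => if PySem.Chars.startswith (r.drop i.toNat) p.1.toList then min b p.2 else b) b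
      = (if pvTier1Kws.any (fun k => PySem.Chars.startswith (r.drop i.toNat) k.toList) then
           (if pvTier2Kws.any (fun k => PySem.Chars.startswith (r.drop i.toNat) k.toList) then
              min (min b 1) 2 else min b 1)
         else
           (if pvTier2Kws.any (fun k => PySem.Chars.startswith (r.drop i.toNat) k.toList) then
              min b 2 else b)) := by
  rw [pvTable_eq, List.foldl_append]
  rw [pvFoldl_const_tier (fun k => PySem.Chars.startswith (r.drop i.toNat) k.toList)]
  rw [pvFoldl_const_tier (fun k => PySem.Chars.startswith (r.drop i.toNat) k.toList)]
  split_ifs <;> rfl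

-- the outer fold over positions, given two per-position tests, is the ordered if-chain on min
theorem pvOuter (a1 a2 : Int → Bool) (is : List Int) (b : Int) :
    is.foldl
        (fun b i =>
          if a1 i then (if a2 i then min (min b 1) 2 else min b 1)
          else (if a2 i then min b 2 else b)) b
      = if is.any a1 then min b 1 else if is.any a2 then min b 2 else b := by
  induction is generalizing b with
  | nil => simp
  | cons i is ih =>
    simp only [List.foldl_cons, List.any_cons]
    by_cases h1 : a1 i = true <;> by_cases h2 : a2 i = true <;>
      simp only [h1, h2, if_true, Bool.true_or, Bool.false_or, ih] <;>
      split_ifs <;> first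
        | exact (by assumption : False).elim
        | (simp only [min_def] <;> split_ifs <;> omega)

-- a nonempty keyword is a substring of r iff it starts at some index of range(len(r))
theorem pvAnyPos_eq_isIn (r : List Char) (kw : List Char) (hkw : kw ≠ []) :
    (PySem.List.pyRange 0 r.length 1).any
        (fun i => PySem.Chars.startswith (r.drop i.toNat) kw)
      = PySem.Chars.isIn kw r := by
  by_cases h : PySem.Chars.isIn kw r = true
  · rw [h, List.any_eq_true]
    obtain ⟨j, hj⟩ := (PySem.Chars.exists_prefix_drop_iff_isIn kw r).mpr h
    have hjlt : j < r.length := by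
      by_contra hge
      rw [List.drop_eq_nil_of_le (by omega)] at hj
      exact hkw (List.prefix_nil.mp hj)
    refine ⟨(j : Int), ?_, ?_⟩
    · rw [PySem.List.mem_pyRange_one]; constructor <;> [positivity; exact_mod_cast hjlt]
    · simpa [PySem.Chars.startswith_iff] using hj
  · rw [Bool.not_eq_true] at h
    rw [h, List.any_eq_false]
    intro i _ hsw
    rw [PySem.Chars.startswith_iff] at hsw
    have : PySem.Chars.isIn kw r = true :=
      (PySem.Chars.exists_prefix_drop_iff_isIn kw r).mp ⟨i.toNat, hsw⟩
    rw [h] at this; exact Bool.false_ne_true this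

-- every keyword in the two lists is nonempty
theorem pvKws_ne_nil : ∀ kw ∈ pvTier1Kws ++ pvTier2Kws, kw.toList ≠ [] := by decide

-- swap the two 'any's: ∃ position with some keyword starting ↔ some keyword is a substring
theorem pvAny_swap (r : List Char) (kws : List String) (hk : ∀ kw ∈ kws, kw.toList ≠ []) :
    (PySem.List.pyRange 0 r.length 1).any
        (fun i => kws.any (fun k => PySem.Chars.startswith (r.drop i.toNat) k.toList))
      = kws.any (fun k => PySem.Chars.isIn k.toList r) := by
  rw [Bool.eq_iff_iff, List.any_eq_true, List.any_eq_true]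
  constructor
  · rintro ⟨i, hi, hk'⟩
    rw [List.any_eq_true] at hk'
    obtain ⟨k, hkmem, hsw⟩ := hk'
    refine ⟨k, hkmem, ?_⟩
    rw [← pvAnyPos_eq_isIn r k.toList (hk k hkmem), List.any_eq_true]
    exact ⟨i, hi, hsw⟩
  · rintro ⟨k, hkmem, hin⟩
    rw [← pvAnyPos_eq_isIn r k.toList (hk k hkmem), List.any_eq_true] at hin
    obtain ⟨i, hi, hsw⟩ := hin
    refine ⟨i, hi, ?_⟩
    rw [List.any_eq_true]
    exact ⟨k, hkmem, hsw⟩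

-- ===== VERDICT (by name: the statement is the Claim_ definition above) =====
theorem get_region_tier_spec : Claim_equal_get_region_tier := by
  intro region _
  unfold Spec_get_region_tier
  simp only [get_region_tier, get_region_tier_alt]
  set r := (PySem.Str.lower region).toList with hr
  have h1 : ∀ kw ∈ pvTier1Kws, kw.toList ≠ [] := fun kw h =>
    pvKws_ne_nil kw (List.mem_append_left _ h)
  have h2 : ∀ kw ∈ pvTier2Kws, kw.toList ≠ [] := fun kw h =>
    pvKws_ne_nil kw (List.mem_append_right _ h)
  rw [PySem.List.foldl_congr_mem (PySem.List.pyRange 0 r.length 1) _ _ 3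
        (fun b i _ => pvInner_eq r i b)]
  rw [pvOuter (fun i => pvTier1Kws.any (fun k => PySem.Chars.startswith (r.drop i.toNat) k.toList))
       (fun i => pvTier2Kws.any (fun k => PySem.Chars.startswith (r.drop i.toNat) k.toList))]
  rw [pvAny_swap r pvTier1Kws h1, pvAny_swap r pvTier2Kws h2]
  simp only [PySem.Str.isIn_eq, ← hr]
  split_ifs <;> rfl
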